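-- pv_equiv track=rewrite | github.com/wwang2/no-three-in-line-agile-finch | orbits/01-algebraic-local-search/solution_generator.py | seed_from_two_qr_curves
-- ===== SOURCE A (Python) =====
-- N = 10  # grid size (locked by the benchmark)
--
-- P_DEFAULT = 11  # prime near N used for the QR curve seed
--
-- def cross(o, a, b):
--     return (a[0] - o[0]) * (b[1] - o[1]) - (a[1] - o[1]) * (b[0] - o[0])
--
-- def is_valid_add(points, p):
--     """True if p can be added without creating a collinear triple."""
--     for i in range(len(points)):
--         for j in range(i + 1, len(points)):
--             if cross(points[i], points[j], p) == 0:
--                 return False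
--     return True
--
-- def qr_curve(a=1, b=0, c=0, p=P_DEFAULT, N=N):
--     """Return points {(x, (a*x^2 + b*x + c) mod p) : 0 <= x < N}, clipped
--     to the grid."""
--     out = []
--     for x in range(N):
--         y = (a * x * x + b * x + c) % p
--         if 0 <= y < N:
--             out.append((x, y))
--     return out
--
-- def seed_from_two_qr_curves(a1=1, b1=0, c1=0,
--                              a2=1, b2=0, c2=0,
--                              p=P_DEFAULT, N=N):
--     """Union of two QR curves; the result may be invalid (collinear), so
--     we filter by accepting points only if they preserve no-three-collinear."""
--     curve1 = qr_curve(a1, b1, c1, p, N)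
--     curve2 = qr_curve(a2, b2, c2, p, N)
--     combined = []
--     for pt in curve1 + curve2:
--         if pt in combined:
--             continue
--         if is_valid_add(combined, pt):
--             combined.append(pt)
--     return combined
-- ===== SOURCE B (Python) =====
-- def _gcd(a, b):
--     while b:
--         a, b = b, a % b
--     return a
--
-- def _qr_curve(a, b, c, p, N):
--     return [(x, (a * x * x + b * x + c) % p) for x in range(N)
--             if 0 <= (a * x * x + b * x + c) % p < N]
--
-- def _no_new_line(points, pt):
--     """True iff adding pt to points creates no collinear triple: one pass
--     collecting gcd-reduced, sign-canonicalized directions pt->q in a set;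
--     a repeated direction means two accepted points are collinear with pt."""
--     dirs = set()
--     px, py = pt
--     for (qx, qy) in points:
--         dx, dy = qx - px, qy - py
--         g = _gcd(abs(dx), abs(dy))
--         dx //= g
--         dy //= g
--         if dx < 0 or (dx == 0 and dy < 0):
--             dx, dy = -dx, -dy
--         if (dx, dy) in dirs:
--             return False
--         dirs.add((dx, dy))
--     return True
--
-- def seed_from_two_qr_curves(a1=1, b1=0, c1=0,
--                             a2=1, b2=0, c2=0,
--                             p=11, N=10):
--     combined = []
--     seen = set()
--     for pt in _qr_curve(a1, b1, c1, p, N) + _qr_curve(a2, b2, c2, p, N):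
--         if pt not in seen and _no_new_line(combined, pt):
--             combined.append(pt)
--             seen.add(pt)
--     return combined
-- ===== Notes on version B (the rewrite author's own statement) =====
-- stated objective: faster
-- what changed: The per-candidate collinearity test is re-implemented: instead of A's nested loop over all pairs of accepted points, B makes a single pass over the accepted points, gcd-reducing and sign-canonicalizing each direction candidate->point and rejecting on a repeated direction in a hash set; duplicate candidates are skipped via a point set instead of a list scan.
import Mathlib
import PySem

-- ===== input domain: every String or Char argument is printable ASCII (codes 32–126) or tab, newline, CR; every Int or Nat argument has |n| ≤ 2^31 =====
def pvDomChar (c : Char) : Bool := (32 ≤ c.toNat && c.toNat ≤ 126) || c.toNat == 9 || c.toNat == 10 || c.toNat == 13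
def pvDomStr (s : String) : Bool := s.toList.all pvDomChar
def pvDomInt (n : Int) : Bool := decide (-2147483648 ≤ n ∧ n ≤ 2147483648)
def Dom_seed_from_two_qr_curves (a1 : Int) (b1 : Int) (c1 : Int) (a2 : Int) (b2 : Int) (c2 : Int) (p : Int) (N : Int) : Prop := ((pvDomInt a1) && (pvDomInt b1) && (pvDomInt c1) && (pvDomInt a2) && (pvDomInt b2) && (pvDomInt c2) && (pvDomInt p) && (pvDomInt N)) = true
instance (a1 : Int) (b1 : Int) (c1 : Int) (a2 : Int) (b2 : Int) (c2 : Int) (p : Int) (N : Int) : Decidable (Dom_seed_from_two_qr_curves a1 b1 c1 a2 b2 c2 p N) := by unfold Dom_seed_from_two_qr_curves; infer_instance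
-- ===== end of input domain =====

-- B replaces A's nested pair loop per candidate by a single pass over the accepted
-- points collecting gcd-reduced sign-canonical directions in a set (objective: faster).

-- ===== PORT A =====
def pvCross (o a b : Int × Int) : Int :=
  (a.1 - o.1) * (b.2 - o.2) - (a.2 - o.2) * (b.1 - o.1)

def pvIsValidAdd (points : List (Int × Int)) (pt : Int × Int) : Bool :=
  (PySem.List.pyRange 0 (points.length : Int) 1).all fun i =>
    (PySem.List.pyRange (i + 1) (points.length : Int) 1).all fun j =>
      !(pvCross (PySem.List.pyGetD points i (0, 0)) (PySem.List.pyGetD points j (0, 0)) pt == 0)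

def pvQrCurve (a b c p N : Int) : List (Int × Int) :=
  (PySem.List.pyRange 0 N 1).foldl (fun out x =>
    let y := PySem.Int.mod (a * x * x + b * x + c) p
    if 0 ≤ y ∧ y < N then out ++ [(x, y)] else out) []

def seed_from_two_qr_curves (a1 : Int) (b1 : Int) (c1 : Int) (a2 : Int) (b2 : Int) (c2 : Int) (p : Int) (N : Int) : List (Int × Int) :=
  let curve1 := pvQrCurve a1 b1 c1 p N
  let curve2 := pvQrCurve a2 b2 c2 p N
  (curve1 ++ curve2).foldl (fun combined pt =>
    if pt ∈ combined then combined
    else if pvIsValidAdd combined pt then combined ++ [pt] else combined) []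

-- ===== PORT B =====
def pvGcdB (a b : Nat) : Nat :=
  if h : b = 0 then a else pvGcdB b (a % b)
decreasing_by exact Nat.mod_lt _ (Nat.pos_of_ne_zero h)

def pvCanonDir (dx dy : Int) : Int × Int :=
  let g : Int := (pvGcdB dx.natAbs dy.natAbs : Nat)
  let dx' := PySem.Int.floordiv dx g
  let dy' := PySem.Int.floordiv dy g
  if dx' < 0 ∨ (dx' = 0 ∧ dy' < 0) then (-dx', -dy') else (dx', dy')

def pvCanon (pt q : Int × Int) : Int × Int :=
  pvCanonDir (q.1 - pt.1) (q.2 - pt.2)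

def pvNoNewLineGo (pt : Int × Int) : List (Int × Int) → PySem.Set (Int × Int) → Bool
  | [], _ => true
  | q :: rest, dirs =>
    let d := pvCanon pt q
    if PySem.Set.contains dirs d then false
    else pvNoNewLineGo pt rest (PySem.Set.add dirs d)

def pvNoNewLine (points : List (Int × Int)) (pt : Int × Int) : Bool :=
  pvNoNewLineGo pt points PySem.Set.empty

def pvQrCurveB (a b c p N : Int) : List (Int × Int) :=
  ((PySem.List.pyRange 0 N 1).filter (fun x =>
      decide (0 ≤ PySem.Int.mod (a * x * x + b * x + c) p ∧
              PySem.Int.mod (a * x * x + b * x + c) p < N))).map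
    (fun x => (x, PySem.Int.mod (a * x * x + b * x + c) p))

def seed_from_two_qr_curves_alt (a1 : Int) (b1 : Int) (c1 : Int) (a2 : Int) (b2 : Int) (c2 : Int) (p : Int) (N : Int) : List (Int × Int) :=
  ((pvQrCurveB a1 b1 c1 p N ++ pvQrCurveB a2 b2 c2 p N).foldl (fun st pt =>
    if pt ∉ st.2 ∧ pvNoNewLine st.1 pt then (st.1 ++ [pt], PySem.Set.add st.2 pt) else st)
    (([] : List (Int × Int)), (PySem.Set.empty : PySem.Set (Int × Int)))).1

-- ===== PRECONDITION & SPEC =====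
-- Pre_ excludes exactly the inputs where Python A raises ZeroDivisionError: p = 0 with N > 0 (both programs raise there).
def Pre_seed_from_two_qr_curves (a1 : Int) (b1 : Int) (c1 : Int) (a2 : Int) (b2 : Int) (c2 : Int) (p : Int) (N : Int) : Prop :=
  p ≠ 0 ∨ N ≤ 0
instance (a1 : Int) (b1 : Int) (c1 : Int) (a2 : Int) (b2 : Int) (c2 : Int) (p : Int) (N : Int) : Decidable (Pre_seed_from_two_qr_curves a1 b1 c1 a2 b2 c2 p N) := by unfold Pre_seed_from_two_qr_curves; infer_instance

def pvWitness_seed_from_two_qr_curves : Int × Int × Int × Int × Int × Int × Int × Int := (1, 0, 0, 1, 1, 0, 11, 10)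

def Spec_seed_from_two_qr_curves (a1 : Int) (b1 : Int) (c1 : Int) (a2 : Int) (b2 : Int) (c2 : Int) (p : Int) (N : Int) (out : List (Int × Int)) : Prop := out = seed_from_two_qr_curves_alt a1 b1 c1 a2 b2 c2 p N
instance (a1 : Int) (b1 : Int) (c1 : Int) (a2 : Int) (b2 : Int) (c2 : Int) (p : Int) (N : Int) (out : List (Int × Int)) : Decidable (Spec_seed_from_two_qr_curves a1 b1 c1 a2 b2 c2 p N out) := by unfold Spec_seed_from_two_qr_curves; infer_instance

-- ===== CLAIM (what is proved, stated in full; the proofs are below) =====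
def Claim_equal_seed_from_two_qr_curves : Prop := ∀ (a1 : Int) (b1 : Int) (c1 : Int) (a2 : Int) (b2 : Int) (c2 : Int) (p : Int) (N : Int), Dom_seed_from_two_qr_curves a1 b1 c1 a2 b2 c2 p N → Pre_seed_from_two_qr_curves a1 b1 c1 a2 b2 c2 p N → Spec_seed_from_two_qr_curves a1 b1 c1 a2 b2 c2 p N (seed_from_two_qr_curves a1 b1 c1 a2 b2 c2 p N)

-- ===== LEMMAS AND PROOFS =====

theorem pvGcdB_eq_gcd (a b : Nat) : pvGcdB a b = Nat.gcd a b := by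
  induction a, b using pvGcdB.induct with
  | case1 a => simp [pvGcdB]
  | case2 a b h ih =>
    rw [pvGcdB]; rw [dif_neg h, ih, Nat.gcd_comm b, ← Nat.gcd_rec, Nat.gcd_comm]

-- the accumulate-if loop is a filter-then-map
theorem foldl_filter_map {α β : Type} (P : α → Prop) [DecidablePred P] (f : α → β)
    (l : List α) (acc : List β) :
    l.foldl (fun out x => if P x then out ++ [f x] else out) acc
      = acc ++ (l.filter (fun x => decide (P x))).map f := by
  induction l generalizing acc with
  | nil => simp
  | cons x xs ih =>
    by_cases h : P x <;> simp [h, ih, List.append_assoc]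

theorem pvQrCurve_eq (a b c p N : Int) : pvQrCurve a b c p N = pvQrCurveB a b c p N := by
  rw [pvQrCurve, pvQrCurveB]
  exact foldl_filter_map
    (fun x => 0 ≤ PySem.Int.mod (a * x * x + b * x + c) p ∧
              PySem.Int.mod (a * x * x + b * x + c) p < N)
    (fun x => (x, PySem.Int.mod (a * x * x + b * x + c) p)) _ []

-- A's nested index loop is the pairwise non-collinearity predicate
theorem isValidAdd_iff (points : List (Int × Int)) (pt : Int × Int) :
    pvIsValidAdd points pt = true ↔ points.Pairwise (fun q r => pvCross q r pt ≠ 0) := by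
  unfold pvIsValidAdd
  simp only [List.all_eq_true, PySem.List.mem_pyRange_one, Bool.not_eq_eq_eq_not,
    Bool.not_true, beq_eq_false_iff_ne, ne_eq, and_imp]
  rw [List.pairwise_iff_getElem]
  constructor
  · intro h i j hi hj hij
    have h0i : (0:Int) ≤ (i:Int) := by positivity
    have := h (i:Int) h0i (by exact_mod_cast hi) (j:Int) (by exact_mod_cast hij) (by exact_mod_cast hj)
    rw [PySem.List.pyGetD_eq_getElem points (0,0) h0i (by exact_mod_cast hi),
      PySem.List.pyGetD_eq_getElem points (0,0) (by positivity) (by exact_mod_cast hj)] at this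
    simpa using this
  · intro h i h0i hilen j hij hjlen
    rw [PySem.List.pyGetD_eq_getElem points (0,0) h0i hilen,
      PySem.List.pyGetD_eq_getElem points (0,0) (by omega) hjlen]
    exact h i.toNat j.toNat (by omega) (by omega) (by omega)

-- B's direction-set pass accepts iff all canonical directions are distinct
theorem noNewLineGo_iff (pt : Int × Int) (l : List (Int × Int)) (dirs : PySem.Set (Int × Int)) :
    pvNoNewLineGo pt l dirs = true ↔
      (l.map (pvCanon pt)).Nodup ∧ ∀ q ∈ l, pvCanon pt q ∉ dirs := by
  induction l generalizing dirs with
  | nil => simp [pvNoNewLineGo]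
  | cons q rest ih =>
    rw [pvNoNewLineGo]
    by_cases hc : pvCanon pt q ∈ dirs
    · rw [if_pos (by simpa using hc)]
      simp only [Bool.false_eq_true, false_iff, not_and]
      intro _ h; exact (h q (List.mem_cons_self ..)) hc
    · rw [if_neg (by simpa using hc), ih]
      simp only [List.map_cons, List.nodup_cons, List.mem_map, PySem.Set.mem_add,
        List.mem_cons, not_or, not_exists]
      constructor
      · rintro ⟨hnd, hmem⟩
        refine ⟨⟨fun x hx => (hmem x hx.1).2 hx.2, hnd⟩, ?_⟩
        rintro r (rfl | hr)
        · exact hc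
        · exact (hmem r hr).1
      · rintro ⟨⟨hq, hnd⟩, hmem⟩
        exact ⟨hnd, fun r hr => ⟨hmem r (Or.inr hr), fun he => hq r ⟨hr, he⟩⟩⟩

theorem noNewLine_iff (points : List (Int × Int)) (pt : Int × Int) :
    pvNoNewLine points pt = true ↔
      points.Pairwise (fun q r => pvCanon pt q ≠ pvCanon pt r) := by
  rw [pvNoNewLine, noNewLineGo_iff]
  simp only [List.Nodup, List.pairwise_map]
  simp [PySem.Set.empty]

-- sign normalization of a direction
def pvNorm (u : Int × Int) : Int × Int :=
  if u.1 < 0 ∨ (u.1 = 0 ∧ u.2 < 0) then (-u.1, -u.2) else u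

theorem pvNorm_neg (u : Int × Int) : pvNorm (-u.1, -u.2) = pvNorm u := by
  obtain ⟨a, b⟩ := u
  simp only [pvNorm]
  split_ifs with h1 h2 h2 <;> simp_all <;> omega

theorem pvNorm_cases (u : Int × Int) : pvNorm u = u ∨ pvNorm u = (-u.1, -u.2) := by
  unfold pvNorm; split_ifs <;> simp

theorem canonDir_spec (dx dy : Int) (h : ¬(dx = 0 ∧ dy = 0)) :
    ∃ g u1 u2, 0 < g ∧ dx = g * u1 ∧ dy = g * u2 ∧ Int.gcd u1 u2 = 1 ∧
      pvCanonDir dx dy = pvNorm (u1, u2) := by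
  have hgpos : 0 < Int.gcd dx dy := Int.gcd_pos_iff.mpr (by tauto)
  refine ⟨Int.gcd dx dy, dx / Int.gcd dx dy, dy / Int.gcd dx dy, by exact_mod_cast hgpos,
    ?_, ?_, ?_, ?_⟩
  · rw [Int.mul_ediv_cancel' (Int.gcd_dvd_left dx dy)]
  · rw [Int.mul_ediv_cancel' (Int.gcd_dvd_right dx dy)]
  · exact Int.gcd_div_gcd_div_gcd hgpos
  · have hcast : ((pvGcdB dx.natAbs dy.natAbs : Nat) : Int) = (Int.gcd dx dy : Int) := by
      rw [pvGcdB_eq_gcd]; rfl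
    have hgpos' : (0:Int) < (Int.gcd dx dy : Int) := by exact_mod_cast hgpos
    simp only [pvCanonDir, hcast, PySem.Int.floordiv_eq_ediv_of_pos hgpos', pvNorm]

-- two coprime integer vectors with vanishing cross product are equal up to sign
theorem primitive_pm (u1 u2 z1 z2 : Int) (hu : Int.gcd u1 u2 = 1) (hz : Int.gcd z1 z2 = 1)
    (h : u1 * z2 - u2 * z1 = 0) :
    (u1, u2) = (z1, z2) ∨ (u1, u2) = (-z1, -z2) := by
  have cu : IsCoprime u1 u2 := Int.isCoprime_iff_gcd_eq_one.mpr hu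
  have cz : IsCoprime z1 z2 := Int.isCoprime_iff_gcd_eq_one.mpr hz
  have h' : u1 * z2 = u2 * z1 := by omega
  have d1 : u1 ∣ z1 := cu.dvd_of_dvd_mul_left ⟨z2, by linarith [h']⟩
  have d2 : z1 ∣ u1 := cz.dvd_of_dvd_mul_left ⟨u2, by linarith [h']⟩
  have habs : u1.natAbs = z1.natAbs :=
    Nat.dvd_antisymm (Int.natAbs_dvd_natAbs.mpr d1) (Int.natAbs_dvd_natAbs.mpr d2)
  have h1 : u1 = z1 ∨ u1 = -z1 := Int.natAbs_eq_natAbs_iff.mp habs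
  by_cases hz1 : z1 = 0
  · subst hz1
    have hu1 : u1 = 0 := by rcases h1 with h1 | h1 <;> omega
    subst hu1
    have hz2 : z2 = 1 ∨ z2 = -1 := by
      have := hz; simp [Int.gcd] at this; omega
    have hu2 : u2 = 1 ∨ u2 = -1 := by
      have := hu; simp [Int.gcd] at this; omega
    rcases hz2 with rfl | rfl <;> rcases hu2 with rfl | rfl <;> simp
  · rcases h1 with rfl | rfl
    · left
      have hc : u1 * z2 = u1 * u2 := by linarith [h']
      have := mul_left_cancel₀ (by omega : u1 ≠ 0) hc
      simp [this]
    · right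
      have hc : z1 * (-z2) = z1 * u2 := by linarith [h']
      have := mul_left_cancel₀ hz1 hc
      simp [← this]

-- two nonzero vectors have the same canonical direction iff their cross product vanishes
theorem canonDir_eq_iff (v w : Int × Int) (hv : v ≠ (0, 0)) (hw : w ≠ (0, 0)) :
    pvCanonDir v.1 v.2 = pvCanonDir w.1 w.2 ↔ v.1 * w.2 - v.2 * w.1 = 0 := by
  obtain ⟨g, u1, u2, hg, he1, he2, hu, hcu⟩ :=
    canonDir_spec v.1 v.2 (by simpa [Prod.ext_iff] using hv)
  obtain ⟨k, z1, z2, hk, hf1, hf2, hz, hcz⟩ :=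
    canonDir_spec w.1 w.2 (by simpa [Prod.ext_iff] using hw)
  rw [hcu, hcz]
  constructor
  · intro hnorm
    have hcross : u1 * z2 - u2 * z1 = 0 := by
      rcases pvNorm_cases (u1, u2) with h1 | h1 <;> rcases pvNorm_cases (z1, z2) with h2 | h2 <;>
        rw [h1, h2] at hnorm <;>
        simp only [Prod.mk.injEq] at hnorm <;>
        obtain ⟨e1, e2⟩ := hnorm <;>
        first
        | linear_combination z2 * e1 - z1 * e2
        | linear_combination -z2 * e1 + z1 * e2
    rw [he1, he2, hf1, hf2]; linear_combination g * k * hcross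
  · intro hc
    rw [he1, he2, hf1, hf2] at hc
    have hgk : g * k ≠ 0 := by positivity
    have hcross : u1 * z2 - u2 * z1 = 0 := by
      have h0 : g * k * (u1 * z2 - u2 * z1) = 0 := by linear_combination hc
      rcases mul_eq_zero.mp h0 with h | h
      · exact absurd h hgk
      · exact h
    rcases primitive_pm u1 u2 z1 z2 hu hz hcross with h | h
    · rw [show (u1, u2) = (z1, z2) from h]
    · rw [show (u1, u2) = (-z1, -z2) from h]; exact pvNorm_neg (z1, z2)

theorem cross_eq_zero_iff_canon (pt q r : Int × Int) (hq : q ≠ pt) (hr : r ≠ pt) :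
    pvCross q r pt = 0 ↔ pvCanon pt q = pvCanon pt r := by
  have hv : (q.1 - pt.1, q.2 - pt.2) ≠ ((0 : Int), (0 : Int)) := by
    intro h; apply hq; obtain ⟨hq1, hq2⟩ := Prod.mk.injEq .. ▸ h
    exact Prod.ext (by omega) (by omega)
  have hw : (r.1 - pt.1, r.2 - pt.2) ≠ ((0 : Int), (0 : Int)) := by
    intro h; apply hr; obtain ⟨hq1, hq2⟩ := Prod.mk.injEq .. ▸ h
    exact Prod.ext (by omega) (by omega)
  rw [pvCanon, pvCanon, canonDir_eq_iff _ _ hv hw]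
  unfold pvCross
  constructor <;> intro h <;> linarith [h]

theorem validAdd_eq_noNewLine (points : List (Int × Int)) (pt : Int × Int)
    (h : pt ∉ points) : pvIsValidAdd points pt = pvNoNewLine points pt := by
  rw [Bool.eq_iff_iff, isValidAdd_iff, noNewLine_iff]
  constructor <;> intro hp <;>
    refine hp.imp_of_mem (fun {q} {r} hq hr hrel => ?_) <;>
    intro he <;> apply hrel
  · exact (cross_eq_zero_iff_canon pt q r (fun e => h (e ▸ hq)) (fun e => h (e ▸ hr))).mpr he
  · exact (cross_eq_zero_iff_canon pt q r (fun e => h (e ▸ hq)) (fun e => h (e ▸ hr))).mp he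

-- B's `seen` set always holds exactly the members of `combined`
theorem fold_eq (l : List (Int × Int)) (acc : List (Int × Int)) (seen : PySem.Set (Int × Int))
    (hinv : ∀ x, x ∈ seen ↔ x ∈ acc) :
    l.foldl (fun combined pt =>
      if pt ∈ combined then combined
      else if pvIsValidAdd combined pt then combined ++ [pt] else combined) acc
    = (l.foldl (fun st pt =>
      if pt ∉ st.2 ∧ pvNoNewLine st.1 pt then (st.1 ++ [pt], PySem.Set.add st.2 pt) else st)
      (acc, seen)).1 := by
  induction l generalizing acc seen with
  | nil => rfl
  | cons pt rest ih =>
    simp only [List.foldl_cons]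
    by_cases hmem : pt ∈ acc
    · rw [if_pos hmem, if_neg (by rw [not_and]; intro h; exact absurd ((hinv pt).mpr hmem) h)]
      exact ih acc seen hinv
    · rw [if_neg hmem, validAdd_eq_noNewLine acc pt hmem]
      have hseen : pt ∉ seen := fun h => hmem ((hinv pt).mp h)
      by_cases hv : pvNoNewLine acc pt = true
      · rw [if_pos hv, if_pos ⟨hseen, hv⟩]
        exact ih (acc ++ [pt]) (PySem.Set.add seen pt) (by
          intro x
          rw [PySem.Set.mem_add, List.mem_append, List.mem_singleton, hinv x])
      · rw [if_neg hv, if_neg (by tauto)]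
        exact ih acc seen hinv

-- ===== VERDICT (by name: the statement is the Claim_ definition above) =====
theorem seed_from_two_qr_curves_spec : Claim_equal_seed_from_two_qr_curves := by
  intro a1 b1 c1 a2 b2 c2 p N _ _
  unfold Spec_seed_from_two_qr_curves seed_from_two_qr_curves seed_from_two_qr_curves_alt
  rw [← pvQrCurve_eq, ← pvQrCurve_eq]
  exact fold_eq _ [] PySem.Set.empty (by intro x; simp [PySem.Set.empty])
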